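-- pv_equiv track=rewrite | github.com/nxp-mcuxpresso/spsdk | tools/docstring_updater_methods.py | _ensure_spsdk_formatting
-- ===== SOURCE A (Python) =====
-- def _ensure_spsdk_formatting(docstring: str) -> str:
--     """Ensure the docstring follows SPSDK formatting with proper empty lines.
--
--     This method processes a docstring to add proper empty lines after the title
--     and before parameter sections according to SPSDK formatting standards.
--
--     :param docstring: The input docstring to format.
--     :return: Formatted docstring with proper SPSDK empty line structure.
--     """
--     lines = docstring.split("\n")
--     if not lines:
--         return docstring
--
--     formatted_lines = []
--     title = lines[0].strip()
--     formatted_lines.append(title)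
--
--     # Always add empty line after title
--     if len(lines) > 1 and lines[1].strip() != "":
--         formatted_lines.append("")
--
--     # Process remaining lines
--     description_ended = False
--
--     for line in lines[1:]:
--         stripped = line.strip()
--
--         # Detect start of parameters section
--         if (
--             stripped.startswith(":param")
--             or stripped.startswith(":return")
--             or stripped.startswith(":raises")
--         ):
--             if not description_ended and formatted_lines and formatted_lines[-1].strip() != "":
--                 # Add empty line before parameters if not already there
--                 formatted_lines.append("")
--             description_ended = True
--
--         formatted_lines.append(line)
--
--     return "\n".join(formatted_lines)
-- ===== SOURCE B (Python) =====
-- def _ensure_spsdk_formatting(docstring: str) -> str: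
--     """Reformat: blank line after the title and before the first :param/:return/:raises block."""
--     lines = docstring.split("\n")
--     if not lines:
--         return docstring
--
--     def suffix(rest, prev_blank):
--         """Recursively build the '\\n'-prefixed text for the body lines.
--
--         Stops at the first marker line: the remainder is emitted verbatim,
--         preceded by one extra '\\n' unless the previous body line was blank.
--         """
--         if not rest:
--             return ""
--         stripped = rest[0].strip()
--         if stripped.startswith((":param", ":return", ":raises")):
--             return ("\n" if prev_blank else "\n\n") + "\n".join(rest)
--         return "\n" + rest[0] + suffix(rest[1:], stripped == "")
--
--     rest = lines[1:]
--     lead = "\n" if rest and rest[0].strip() != "" else ""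
--     return lines[0].strip() + lead + suffix(rest, True)
-- ===== Notes on version B (the rewrite author's own statement) =====
-- stated objective: alternative
-- what changed: Replaces A's list-accumulator loop with a description_ended flag (which inspects the accumulator's last element to decide on blanks) by a recursive string builder over the body lines that tracks whether the previous body line was blank and stops at the first :param/:return/:raises marker, joining the remainder verbatim.
import Mathlib
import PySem

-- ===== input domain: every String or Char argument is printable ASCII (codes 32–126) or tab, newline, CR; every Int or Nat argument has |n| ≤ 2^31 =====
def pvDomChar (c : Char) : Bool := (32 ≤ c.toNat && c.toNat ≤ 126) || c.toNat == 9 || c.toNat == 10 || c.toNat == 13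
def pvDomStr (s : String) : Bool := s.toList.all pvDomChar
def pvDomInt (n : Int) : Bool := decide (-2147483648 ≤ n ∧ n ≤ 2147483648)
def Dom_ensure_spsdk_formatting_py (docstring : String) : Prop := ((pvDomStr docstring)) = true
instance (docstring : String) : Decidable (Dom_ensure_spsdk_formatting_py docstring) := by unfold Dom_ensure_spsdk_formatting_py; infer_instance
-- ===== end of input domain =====

-- B replaces A's list-accumulator loop (with a description_ended flag inspecting the accumulator's
-- last element) by a recursive string builder over the body lines that stops at the first
-- :param/:return/:raises marker (objective: alternative decomposition, same cost).

-- ===== PORT A =====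
-- the for-loop of A: state = (formatted_lines, description_ended)
def pvALoop : List String → Bool → List String → List String
  | acc, _, [] => acc
  | acc, ended, line :: rest =>
    let stripped := PySem.Str.strip line
    if PySem.Str.startswith stripped ":param" || PySem.Str.startswith stripped ":return"
        || PySem.Str.startswith stripped ":raises" then
      let acc := if !ended && decide (acc ≠ []) && decide (PySem.Str.strip (acc.getLastD "") ≠ "") then
        acc ++ [""] else acc
      pvALoop (acc ++ [line]) true rest
    else
      pvALoop (acc ++ [line]) ended rest

def ensure_spsdk_formatting_py (docstring : String) : String :=
  let lines := (PySem.Str.split? docstring "\n").getD []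
  if lines = [] then docstring
  else
    let title := PySem.Str.strip (lines.headD "")
    let formatted := [title]
    let formatted := if lines.length > 1 ∧ PySem.Str.strip (lines.getD 1 "") ≠ "" then
      formatted ++ [""] else formatted
    PySem.Str.join "\n" (pvALoop formatted false lines.tail)

-- ===== PORT B =====
-- suffix(rest, prev_blank): the "\n"-prefixed text for the body lines, built recursively;
-- at the first marker line the remainder is joined verbatim after "\n" or "\n\n".
def pvSuffix : List String → Bool → String
  | [], _ => ""
  | r0 :: rtail, prevBlank =>
    let stripped := PySem.Str.strip r0
    if PySem.Str.startswith stripped ":param" || PySem.Str.startswith stripped ":return"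
        || PySem.Str.startswith stripped ":raises" then
      (if prevBlank then "\n" else "\n\n") ++ PySem.Str.join "\n" (r0 :: rtail)
    else
      "\n" ++ r0 ++ pvSuffix rtail (stripped == "")

def ensure_spsdk_formatting_py_alt (docstring : String) : String :=
  let lines := (PySem.Str.split? docstring "\n").getD []
  if lines = [] then docstring
  else
    let rest := lines.tail
    let lead := if rest ≠ [] ∧ PySem.Str.strip (rest.headD "") ≠ "" then "\n" else ""
    PySem.Str.strip (lines.headD "") ++ lead ++ pvSuffix rest true

-- ===== PRECONDITION & SPEC =====
def Spec_ensure_spsdk_formatting_py (docstring : String) (out : String) : Prop := out = ensure_spsdk_formatting_py_alt docstring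
instance (docstring : String) (out : String) : Decidable (Spec_ensure_spsdk_formatting_py docstring out) := by unfold Spec_ensure_spsdk_formatting_py; infer_instance

-- ===== CLAIM (what is proved, stated in full; the proofs are below) =====
def Claim_equal_ensure_spsdk_formatting_py : Prop := ∀ (docstring : String), Dom_ensure_spsdk_formatting_py docstring → Spec_ensure_spsdk_formatting_py docstring (ensure_spsdk_formatting_py docstring)

-- ===== LEMMAS AND PROOFS =====

theorem pv_join_singleton (x : String) : PySem.Str.join "\n" [x] = x := by
  simp [PySem.Str.join, String.ofList_toList]

theorem pv_join_cons_cons (x y : String) (t : List String) :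
    PySem.Str.join "\n" (x :: y :: t) = x ++ "\n" ++ PySem.Str.join "\n" (y :: t) := by
  have h : (PySem.Str.join "\n" (x :: y :: t)).toList
      = (x ++ "\n" ++ PySem.Str.join "\n" (y :: t)).toList := by
    simp [PySem.Str.toList_join, String.toList_append, PySem.Chars.join_cons_cons]
  exact String.toList_inj.mp h

theorem pv_join_append_cons (acc : List String) (y : String) (ys : List String) (h : acc ≠ []) :
    PySem.Str.join "\n" (acc ++ y :: ys)
      = PySem.Str.join "\n" acc ++ "\n" ++ PySem.Str.join "\n" (y :: ys) := by
  induction acc with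
  | nil => exact absurd rfl h
  | cons a t ih =>
    cases t with
    | nil => simp [pv_join_cons_cons, pv_join_singleton]
    | cons b t' =>
      have := ih (by simp)
      simp only [List.cons_append] at this ⊢
      rw [pv_join_cons_cons, this, pv_join_cons_cons a b t']
      simp [String.append_assoc]

theorem pvALoop_true (l : List String) : ∀ acc, pvALoop acc true l = acc ++ l := by
  induction l with
  | nil => intro acc; simp [pvALoop]
  | cons x xs ih =>
    intro acc
    simp only [pvALoop]
    split <;> simp [ih]

theorem pvKey (rest : List String) : ∀ acc, acc ≠ [] →
    PySem.Str.join "\n" (pvALoop acc false rest)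
      = PySem.Str.join "\n" acc ++ pvSuffix rest (PySem.Str.strip (acc.getLastD "") == "") := by
  induction rest with
  | nil => intro acc _; simp [pvALoop, pvSuffix, String.append_empty]
  | cons x xs ih =>
    intro acc hacc
    by_cases hm : (PySem.Str.startswith (PySem.Str.strip x) ":param"
        || PySem.Str.startswith (PySem.Str.strip x) ":return"
        || PySem.Str.startswith (PySem.Str.strip x) ":raises") = true
    · by_cases hb : PySem.Str.strip (acc.getLastD "") = ""
      · have hd : decide (PySem.Str.strip (acc.getLastD "") ≠ "") = false :=
          decide_eq_false (by simpa using hb)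
        have hc : (!false && decide (acc ≠ []) && decide (PySem.Str.strip (acc.getLastD "") ≠ "")) = false := by
          rw [hd]; simp
        simp only [pvALoop, hm, if_pos, hc, Bool.false_eq_true, if_neg, not_false_eq_true]
        rw [pvALoop_true]
        simp only [List.append_assoc, List.cons_append, List.nil_append]
        rw [pv_join_append_cons acc x xs hacc]
        have hbeq : (PySem.Str.strip (acc.getLastD "") == "") = true := by
          simp only [beq_iff_eq]; exact hb
        simp only [pvSuffix]
        rw [if_pos hm, if_pos hbeq, String.append_assoc]
      · have hd : decide (PySem.Str.strip (acc.getLastD "") ≠ "") = true :=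
          decide_eq_true (by simpa using hb)
        have hc : (!false && decide (acc ≠ []) && decide (PySem.Str.strip (acc.getLastD "") ≠ "")) = true := by
          rw [hd, decide_eq_true hacc]; simp
        simp only [pvALoop, hm, if_pos, hc]
        rw [pvALoop_true]
        simp only [List.append_assoc, List.cons_append, List.nil_append]
        rw [pv_join_append_cons acc "" (x :: xs) hacc, pv_join_cons_cons]
        have hbeq : (PySem.Str.strip (acc.getLastD "") == "") = false := by
          simp only [beq_eq_false_iff_ne, ne_eq]; exact hb
        simp only [pvSuffix]
        rw [if_pos hm, hbeq]
        simp only [Bool.false_eq_true, if_neg, not_false_eq_true]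
        rw [String.empty_append]
        have hx : ("\n" : String) ++ ("\n" ++ PySem.Str.join "\n" (x :: xs))
            = "\n\n" ++ PySem.Str.join "\n" (x :: xs) := by
          rw [← String.append_assoc, show ("\n" : String) ++ "\n" = "\n\n" by decide]
        rw [String.append_assoc, hx]
    · have hm' : (PySem.Str.startswith (PySem.Str.strip x) ":param"
          || PySem.Str.startswith (PySem.Str.strip x) ":return"
          || PySem.Str.startswith (PySem.Str.strip x) ":raises") = false := by
        simpa using hm
      simp only [pvALoop, hm', Bool.false_eq_true, if_neg, not_false_eq_true]
      rw [ih (acc ++ [x]) (by simp)]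
      have hlast : (acc ++ [x]).getLastD "" = x := by simp
      rw [hlast, pv_join_append_cons acc x [] hacc, pv_join_singleton]
      simp only [pvSuffix]
      rw [if_neg (by rw [hm']; exact Bool.false_ne_true)]
      simp [String.append_assoc]

-- ===== VERDICT (by name: the statement is the Claim_ definition above) =====
theorem ensure_spsdk_formatting_py_spec : Claim_equal_ensure_spsdk_formatting_py := by
  intro docstring _
  unfold Spec_ensure_spsdk_formatting_py ensure_spsdk_formatting_py ensure_spsdk_formatting_py_alt
  cases hl : (PySem.Str.split? docstring "\n").getD [] with
  | nil => rfl
  | cons l0 ls =>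
    dsimp only [List.headD_cons, List.tail_cons, List.length_cons]
    cases ls with
    | nil =>
      simp [pvALoop, pvSuffix, pv_join_singleton, String.append_empty]
    | cons l1 ls' =>
      set title := PySem.Str.strip l0 with htitle
      by_cases hc : PySem.Str.strip l1 = ""
      · have hcond : ¬ ((l1 :: ls').length + 1 > 1 ∧ PySem.Str.strip ((l0 :: l1 :: ls').getD 1 "") ≠ "") := by
          simp [hc]
        rw [if_neg hcond]
        have hnm : (PySem.Str.startswith (PySem.Str.strip l1) ":param"
            || PySem.Str.startswith (PySem.Str.strip l1) ":return"
            || PySem.Str.startswith (PySem.Str.strip l1) ":raises") = false := by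
          rw [hc]; decide
        simp only [pvALoop, hnm, Bool.false_eq_true, if_neg, not_false_eq_true]
        rw [pvKey ls' ([title] ++ [l1]) (by simp)]
        have hlast : (([title] ++ [l1]).getLastD "") = l1 := by simp
        rw [hlast, pv_join_append_cons [title] l1 [] (by simp), pv_join_singleton, pv_join_singleton]
        have hcond2 : ¬ ((l1 :: ls' : List String) ≠ [] ∧ PySem.Str.strip ((l1 :: ls').headD "") ≠ "") := by
          simp [hc]
        rw [if_neg hcond2]
        simp only [pvSuffix, hnm, Bool.false_eq_true, if_neg, not_false_eq_true]
        rw [hc]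
        simp [String.append_assoc, String.append_empty]
      · have hcond : ((l1 :: ls').length + 1 > 1 ∧ PySem.Str.strip ((l0 :: l1 :: ls').getD 1 "") ≠ "") := by
          exact ⟨by simp, by simpa using hc⟩
        rw [if_pos hcond]
        rw [pvKey (l1 :: ls') ([title] ++ [""]) (by simp)]
        have hlast : (([title] ++ [""] : List String).getLastD "") = "" := by simp
        rw [hlast, pv_join_append_cons [title] "" [] (by simp), pv_join_singleton, pv_join_singleton]
        have hstrip : (PySem.Str.strip "" == "") = true := by decide
        rw [hstrip]
        have hcond2 : ((l1 :: ls' : List String) ≠ [] ∧ PySem.Str.strip ((l1 :: ls').headD "") ≠ "") := by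
          simpa using hc
        rw [if_pos hcond2]
        simp [String.append_assoc, String.append_empty]
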